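-- pv_equiv track=rewrite | github.com/daki001/aoc2021 | Day17/part2.py | calculate_height
-- ===== SOURCE A (Python) =====
-- def calculate_height(y_vels):
-- 	max_height = 0
-- 	for key in y_vels:
-- 		max_height_per_key = 0
-- 		for i in range(key + 1):
-- 			max_height_per_key += i
-- 		max_height = max(max_height, max_height_per_key)
--
-- 	return max_height
-- ===== SOURCE B (Python) =====
-- def calculate_height(y_vels):
--     m = max(y_vels) if y_vels else 0
--     return m * (m + 1) // 2 if m > 0 else 0
-- ===== Notes on version B (the rewrite author's own statement) =====
-- stated objective: faster
-- what changed: Replaces the per-element triangular-sum loop nested in a running max by a single max-reduction followed by the closed-form triangular number m*(m+1)//2 (0 for non-positive or empty).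
import Mathlib
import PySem

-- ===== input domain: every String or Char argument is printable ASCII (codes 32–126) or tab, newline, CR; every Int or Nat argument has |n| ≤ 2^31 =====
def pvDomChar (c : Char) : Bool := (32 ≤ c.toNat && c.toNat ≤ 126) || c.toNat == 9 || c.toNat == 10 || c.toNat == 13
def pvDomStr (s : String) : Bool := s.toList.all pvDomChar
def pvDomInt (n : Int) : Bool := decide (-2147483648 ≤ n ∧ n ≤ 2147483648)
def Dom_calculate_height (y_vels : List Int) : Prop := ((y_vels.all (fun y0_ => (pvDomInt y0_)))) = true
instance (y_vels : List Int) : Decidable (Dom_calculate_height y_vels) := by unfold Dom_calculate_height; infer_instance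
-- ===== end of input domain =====

-- B replaces A's nested per-velocity summation loop by a single max-reduction plus the closed-form triangular number (objective: faster).


-- ===== PORT A =====
-- inner loop: max_height_per_key = 0; for i in range(key + 1): max_height_per_key += i
def pvTriLoop (key : Int) : Int :=
  (PySem.List.pyRange 0 (key + 1) 1).foldl (fun acc i => acc + i) 0

def calculate_height (y_vels : List Int) : Int :=
  y_vels.foldl (fun max_height key => max max_height (pvTriLoop key)) 0

-- ===== PORT B =====
-- m = max(y_vels) if y_vels else 0; return m*(m+1)//2 if m > 0 else 0
def calculate_height_alt (y_vels : List Int) : Int :=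
  let m : Int := (PySem.List.max? y_vels (fun x => x)).getD 0
  if m > 0 then PySem.Int.floordiv (m * (m + 1)) 2 else 0

-- ===== PRECONDITION & SPEC =====
def Spec_calculate_height (y_vels : List Int) (out : Int) : Prop := out = calculate_height_alt y_vels
instance (y_vels : List Int) (out : Int) : Decidable (Spec_calculate_height y_vels out) := by unfold Spec_calculate_height; infer_instance

-- ===== CLAIM (what is proved, stated in full; the proofs are below) =====
def Claim_equal_calculate_height : Prop := ∀ (y_vels : List Int), Dom_calculate_height y_vels → Spec_calculate_height y_vels (calculate_height y_vels)

-- ===== LEMMAS AND PROOFS =====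

-- Gauss: twice the sum of range(n) is n*(n-1).
theorem pv_two_sum_range (n : Nat) :
    2 * ((PySem.List.pyRange 0 (n : Int) 1).foldl (fun acc i => acc + i) 0) = (n : Int) * ((n : Int) - 1) := by
  induction n with
  | zero => simp
  | succ k ih =>
    have h : ((k : Int) + 1) = ((k + 1 : Nat) : Int) := by push_cast; ring
    have hr := PySem.List.pyRange_one_succ_right (a := 0) (b := (k : Int)) (by exact_mod_cast Nat.zero_le k)
    rw [← h, hr, List.foldl_append]
    have hc : ∀ (c : Int), (PySem.List.pyRange 0 (k : Int) 1).foldl (fun acc i => acc + i) c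
        = c + (PySem.List.pyRange 0 (k : Int) 1).foldl (fun acc i => acc + i) 0 := by
      intro c
      rw [PySem.List.foldl_add (g := fun x => x), PySem.List.foldl_add (g := fun x => x)]
      ring
    simp only [List.foldl_cons, List.foldl_nil]
    rw [hc]
    nlinarith [ih]

-- twice the inner loop, in closed form
theorem pvTriLoop_two (k : Int) : 2 * pvTriLoop k = if 0 < k then k * (k + 1) else 0 := by
  unfold pvTriLoop
  by_cases hk : 0 < k
  · have hn : k + 1 = ((k.toNat + 1 : Nat) : Int) := by omega
    rw [hn, pv_two_sum_range]
    rw [if_pos hk]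
    have h1 : ((k.toNat + 1 : Nat) : Int) = k + 1 := by omega
    rw [h1]
    ring
  · rw [if_neg hk]
    rcases lt_or_eq_of_le (not_lt.mp hk) with h | h
    · rw [PySem.List.pyRange_one_eq_nil (by omega)]
      rfl
    · subst h
      rw [PySem.List.pyRange_one_singleton]
      simp

theorem pvTriLoop_mono {a b : Int} (h : a ≤ b) : pvTriLoop a ≤ pvTriLoop b := by
  have ha := pvTriLoop_two a
  have hb := pvTriLoop_two b
  by_cases h0 : 0 < a
  · rw [if_pos h0] at ha
    rw [if_pos (lt_of_lt_of_le h0 h)] at hb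
    nlinarith
  · rw [if_neg h0] at ha
    by_cases h1 : 0 < b
    · rw [if_pos h1] at hb
      nlinarith
    · rw [if_neg h1] at hb
      omega

theorem pv_fold_max_tri (l : List Int) (c : Int) :
    l.foldl (fun mh key => max mh (pvTriLoop key)) (pvTriLoop c) = pvTriLoop (l.foldl max c) := by
  induction l generalizing c with
  | nil => rfl
  | cons x t ih =>
    simp only [List.foldl_cons]
    have h : max (pvTriLoop c) (pvTriLoop x) = pvTriLoop (max c x) := by
      rcases le_total c x with h | h
      · rw [max_eq_right (pvTriLoop_mono h), max_eq_right h]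
      · rw [max_eq_left (pvTriLoop_mono h), max_eq_left h]
    rw [h, ih]

theorem pv_foldl_max_pull (t : List Int) : ∀ (a b : Int),
    t.foldl max (max a b) = max a (t.foldl max b) := by
  induction t with
  | nil => intro a b; rfl
  | cons y s ih =>
    intro a b
    simp only [List.foldl_cons]
    rw [max_assoc, ih]

theorem pvTriLoop_closed (k : Int) :
    pvTriLoop k = if 0 < k then PySem.Int.floordiv (k * (k + 1)) 2 else 0 := by
  have h := pvTriLoop_two k
  by_cases hk : 0 < k
  · rw [if_pos hk] at h ⊢
    rw [PySem.Int.floordiv_eq_ediv_of_pos (by norm_num)]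
    omega
  · rw [if_neg hk] at h ⊢
    omega

-- ===== VERDICT (by name: the statement is the Claim_ definition above) =====
theorem calculate_height_spec : Claim_equal_calculate_height := by
  intro y_vels _
  unfold Spec_calculate_height calculate_height calculate_height_alt
  cases y_vels with
  | nil => rfl
  | cons x t =>
    rw [PySem.List.max?_id_cons, Option.getD_some]
    have h0 : (0 : Int) = pvTriLoop 0 := rfl
    rw [h0, pv_fold_max_tri]
    simp only [List.foldl_cons]
    rw [pv_foldl_max_pull, pvTriLoop_closed]
    set m := t.foldl max x with hm
    by_cases hp : (0 : Int) < m
    · rw [if_pos (by omega : (0:Int) < max 0 m), max_eq_right hp.le, ← h0, if_pos hp]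
    · rw [if_neg (by omega : ¬ (0:Int) < max 0 m), ← h0, if_neg hp]
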